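-- pv_equiv track=rewrite | github.com/robrec/bremesh-meshcore-bot | modules/scheduler.py | _has_mesh_info_placeholders
-- ===== SOURCE A (Python) =====
-- def _has_mesh_info_placeholders(message: str) -> bool:
--     """Check if message contains mesh info placeholders"""
--     placeholders = [
--         '{total_contacts}', '{total_repeaters}', '{total_companions}',
--         '{total_roomservers}', '{total_sensors}', '{recent_activity_24h}',
--         '{new_companions_7d}', '{new_repeaters_7d}', '{new_roomservers_7d}', '{new_sensors_7d}',
--         '{total_contacts_30d}', '{total_repeaters_30d}', '{total_companions_30d}',
--         '{total_roomservers_30d}', '{total_sensors_30d}',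
--         # Legacy placeholders for backward compatibility
--         '{repeaters}', '{companions}'
--     ]
--     return any(placeholder in message for placeholder in placeholders)
-- ===== SOURCE B (Python) =====
-- _MESH_PLACEHOLDER_NAMES = frozenset({
--     '{total_contacts}', '{total_repeaters}', '{total_companions}',
--     '{total_roomservers}', '{total_sensors}', '{recent_activity_24h}',
--     '{new_companions_7d}', '{new_repeaters_7d}', '{new_roomservers_7d}', '{new_sensors_7d}',
--     '{total_contacts_30d}', '{total_repeaters_30d}', '{total_companions_30d}',
--     '{total_roomservers_30d}', '{total_sensors_30d}',
--     '{repeaters}', '{companions}'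
-- })
--
--
-- def _has_mesh_info_placeholders(message: str) -> bool:
--     """Single left-to-right scan: at each '{', grab the brace-delimited
--     token and test it against the known placeholder set."""
--     n = len(message)
--     for i in range(n):
--         if message[i] == '{':
--             j = i + 1
--             while j < n and message[j] != '}':
--                 j += 1
--             if j < n and message[i:j + 1] in _MESH_PLACEHOLDER_NAMES:
--                 return True
--     return False
-- ===== Notes on version B (the rewrite author's own statement) =====
-- stated objective: alternative
-- what changed: Instead of testing each of the 17 placeholder substrings against the message (17 linear scans), B makes one left-to-right scan of the message: at each '{' it grabs the brace-delimited token up to the next '}' and looks it up in a precomputed frozenset of placeholder names.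
import Mathlib
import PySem

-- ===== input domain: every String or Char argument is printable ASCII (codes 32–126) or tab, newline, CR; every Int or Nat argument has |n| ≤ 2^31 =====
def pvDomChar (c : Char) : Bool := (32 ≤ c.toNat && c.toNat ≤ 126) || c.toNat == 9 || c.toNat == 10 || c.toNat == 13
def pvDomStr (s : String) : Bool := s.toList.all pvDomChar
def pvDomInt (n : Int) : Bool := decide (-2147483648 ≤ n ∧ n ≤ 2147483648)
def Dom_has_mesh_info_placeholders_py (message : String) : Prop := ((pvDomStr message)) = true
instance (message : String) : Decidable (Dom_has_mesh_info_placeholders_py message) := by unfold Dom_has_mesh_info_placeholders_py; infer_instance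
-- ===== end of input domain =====

-- B replaces A's 17 substring tests by a single left-to-right scan that grabs each
-- brace-delimited token and looks it up in a fixed set of placeholder names (objective: alternative).


-- ===== PORT A =====
-- A's literal placeholder list
def pvPlaceholders : List String :=
  ["{total_contacts}", "{total_repeaters}", "{total_companions}",
   "{total_roomservers}", "{total_sensors}", "{recent_activity_24h}",
   "{new_companions_7d}", "{new_repeaters_7d}", "{new_roomservers_7d}", "{new_sensors_7d}",
   "{total_contacts_30d}", "{total_repeaters_30d}", "{total_companions_30d}",
   "{total_roomservers_30d}", "{total_sensors_30d}",
   "{repeaters}", "{companions}"]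

-- any(placeholder in message for placeholder in placeholders)
def has_mesh_info_placeholders_py (message : String) : Bool :=
  pvPlaceholders.any (fun placeholder => PySem.Str.isIn placeholder message)

-- ===== PORT B =====
-- B's frozenset of placeholder names, as the list of its distinct elements (char lists)
def pvNames : List (List Char) :=
  ["{total_contacts}".toList, "{total_repeaters}".toList, "{total_companions}".toList,
   "{total_roomservers}".toList, "{total_sensors}".toList, "{recent_activity_24h}".toList,
   "{new_companions_7d}".toList, "{new_repeaters_7d}".toList, "{new_roomservers_7d}".toList,
   "{new_sensors_7d}".toList, "{total_contacts_30d}".toList, "{total_repeaters_30d}".toList,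
   "{total_companions_30d}".toList, "{total_roomservers_30d}".toList, "{total_sensors_30d}".toList,
   "{repeaters}".toList, "{companions}".toList]

-- B's scan: the outer `for i in range(n)` walks the suffixes of the message; at a '{'
-- the inner `while` (here: takeWhile over the tail) grabs message[i:j+1], the token up to
-- the first '}', and `j < n` is '}' ∈ rest; the token is looked up in pvNames.
def pvScan : List Char → Bool
  | [] => false
  | c :: rest =>
    if c = '{' ∧ '}' ∈ rest then
      (pvNames.contains (c :: (rest.takeWhile (· ≠ '}') ++ ['}']))) || pvScan rest
    else pvScan rest

def has_mesh_info_placeholders_py_alt (message : String) : Bool :=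
  pvScan message.toList

-- ===== PRECONDITION & SPEC =====
def Spec_has_mesh_info_placeholders_py (message : String) (out : Bool) : Prop := out = has_mesh_info_placeholders_py_alt message
instance (message : String) (out : Bool) : Decidable (Spec_has_mesh_info_placeholders_py message out) := by unfold Spec_has_mesh_info_placeholders_py; infer_instance

-- ===== CLAIM (what is proved, stated in full; the proofs are below) =====
def Claim_equal_has_mesh_info_placeholders_py : Prop := ∀ (message : String), Dom_has_mesh_info_placeholders_py message → Spec_has_mesh_info_placeholders_py message (has_mesh_info_placeholders_py message)

-- ===== LEMMAS AND PROOFS =====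

-- every placeholder name contains '}', starts with '{', and equals its own brace token
theorem pvNames_ok : ∀ p ∈ pvNames,
    '}' ∈ p ∧ p.head? = some '{' ∧ p.takeWhile (· ≠ '}') ++ ['}'] = p := by decide

theorem pvNames_eq_map : pvNames = pvPlaceholders.map String.toList := by decide

-- when '}' occurs in a list, the brace token (takeWhile up to the first '}', plus '}') is a prefix
theorem tok_prefix (l : List Char) (h : '}' ∈ l) :
    l.takeWhile (· ≠ '}') ++ ['}'] <+: l := by
  induction l with
  | nil => cases h
  | cons a t ih =>
    by_cases ha : a = '}'
    · subst ha
      have he : ('}' :: t).takeWhile (· ≠ '}') = [] := by simp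
      rw [he]
      exact ⟨t, rfl⟩
    · have ht : '}' ∈ t := by
        rcases List.mem_cons.mp h with h1 | h1
        · exact absurd h1.symm ha
        · exact h1
      have he : (a :: t).takeWhile (· ≠ '}') = a :: t.takeWhile (· ≠ '}') := by
        simp [ha]
      rw [he, List.cons_append]
      exact List.cons_prefix_cons.mpr ⟨rfl, ih ht⟩

-- appending on the right does not change takeWhile once the predicate fails inside l
theorem takeWhile_append_of_mem {l u : List Char} (h : '}' ∈ l) :
    (l ++ u).takeWhile (· ≠ '}') = l.takeWhile (· ≠ '}') := by
  rw [List.takeWhile_append]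
  split
  · rename_i hlen
    have heq : l.takeWhile (· ≠ '}') = l :=
      (List.takeWhile_prefix _).eq_of_length hlen
    have := (List.takeWhile_eq_self_iff).mp heq '}' h
    simp at this
  · rfl

-- the scan finds a hit iff some placeholder name occurs as an infix
theorem scan_iff_infix (cs : List Char) :
    pvScan cs = true ↔ ∃ p ∈ pvNames, p <:+: cs := by
  induction cs with
  | nil =>
    simp only [pvScan, List.infix_nil]
    constructor
    · intro h; exact absurd h (by decide)
    · rintro ⟨p, hp, rfl⟩; exact absurd hp (by decide)
  | cons c rest ih =>
    constructor
    · intro h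
      rw [pvScan] at h
      split at h
      · rename_i hcond
        rcases Bool.or_eq_true_iff.mp h with htok | hrest
        · refine ⟨c :: (rest.takeWhile (· ≠ '}') ++ ['}']),
            List.contains_iff_mem.mp htok, ?_⟩
          exact (List.cons_prefix_cons.mpr ⟨rfl, tok_prefix rest hcond.2⟩).isInfix
        · obtain ⟨p, hp, hinf⟩ := ih.mp hrest
          exact ⟨p, hp, hinf.trans (List.suffix_cons c rest).isInfix⟩
      · obtain ⟨p, hp, hinf⟩ := ih.mp h
        exact ⟨p, hp, hinf.trans (List.suffix_cons c rest).isInfix⟩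
    · rintro ⟨p, hp, hinf⟩
      obtain ⟨hmem, hhead, htok⟩ := pvNames_ok p hp
      rcases List.infix_cons_iff.mp hinf with hpre | hsuf
      · -- p is a prefix of c :: rest: the token grabbed at this position is exactly p
        cases p with
        | nil => simp at hhead
        | cons a q =>
          simp only [List.head?_cons, Option.some.injEq] at hhead
          subst hhead
          obtain ⟨u, hu⟩ := hpre
          have hc : c = '{' := by
            have := congrArg List.head? hu; simpa using this.symm
          have hrest : rest = q ++ u := by
            have := congrArg List.tail hu; simpa using this.symm
          have hqmem : '}' ∈ q := by
            rcases List.mem_cons.mp hmem with h1 | h1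
            · exact absurd h1.symm (by decide)
            · exact h1
          have hmemrest : '}' ∈ rest := hrest ▸ List.mem_append_left u hqmem
          have htw : rest.takeWhile (· ≠ '}') = q.takeWhile (· ≠ '}') := by
            rw [hrest]; exact takeWhile_append_of_mem hqmem
          rw [List.takeWhile_cons] at htok
          simp only [show (decide ('{' ≠ '}')) = true by decide, if_true] at htok
          have htokq : q.takeWhile (· ≠ '}') ++ ['}'] = q := by
            have := htok
            simp only [List.cons_append] at this
            exact (List.cons.injEq _ _ _ _ ▸ this).2
          rw [pvScan, if_pos ⟨hc, hmemrest⟩]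
          apply Bool.or_eq_true_iff.mpr; left
          apply List.contains_iff_mem.mpr
          have : c :: (rest.takeWhile (· ≠ '}') ++ ['}']) = '{' :: q := by
            rw [hc, htw, htokq]
          rw [this]; exact hp
      · have h2 := ih.mpr ⟨p, hp, hsuf⟩
        rw [pvScan]
        split
        · simp [h2]
        · exact h2

-- A's any-over-placeholders equals the same infix condition
theorem portA_iff (message : String) :
    has_mesh_info_placeholders_py message = true ↔
      ∃ p ∈ pvNames, p <:+: message.toList := by
  rw [has_mesh_info_placeholders_py, List.any_eq_true]
  constructor
  · rintro ⟨s, hs, hin⟩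
    exact ⟨s.toList, pvNames_eq_map ▸ List.mem_map_of_mem hs,
      (PySem.Str.isIn_iff_infix _ _).mp hin⟩
  · rintro ⟨p, hp, hinf⟩
    rw [pvNames_eq_map] at hp
    obtain ⟨s, hs, rfl⟩ := List.mem_map.mp hp
    exact ⟨s, hs, (PySem.Str.isIn_iff_infix _ _).mpr hinf⟩

-- ===== VERDICT (by name: the statement is the Claim_ definition above) =====
theorem has_mesh_info_placeholders_py_spec : Claim_equal_has_mesh_info_placeholders_py := by
  intro message _
  unfold Spec_has_mesh_info_placeholders_py has_mesh_info_placeholders_py_alt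
  have h1 := portA_iff message
  have h2 := scan_iff_infix message.toList
  cases hs : pvScan message.toList
  · cases hA : has_mesh_info_placeholders_py message
    · rfl
    · exact absurd (h2.mpr (h1.mp hA)) (by simp [hs])
  · exact h1.mpr (h2.mp hs)
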